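-- pv_equiv track=rewrite | github.com/ruicore/python | Learn/2019-04-10-written-examination04.py | find
-- ===== SOURCE A (Python) =====
-- def find(x: int, k: int) -> int:
--     result, one = 0, 1
--     while k:
--         while one & x:
--             one <<= 1
--         result += one * (k & 1)
--         k >>= 1
--         one <<= 1
--     return result
-- ===== SOURCE B (Python) =====
-- def find(x: int, k: int) -> int:
--     if k == 0:
--         return 0
--     # lowest zero bit of x as a power of two: x ^ (x+1) == 2^(q+1)-1 where q is that bit
--     z = ((x ^ (x + 1)) + 1) >> 1
--     return (z if k & 1 else 0) + find(x | z, k >> 1)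
-- ===== Notes on version B (the rewrite author's own statement) =====
-- stated objective: alternative
-- what changed: Replaces the nested loops with persistent mask state by a recursion that each step locates the lowest zero bit of x in O(1) via the carry identity ((x ^ (x+1)) + 1) >> 1, deposits the low bit of k there, and recurses on x with that bit set and k halved; no mask or position counter is kept.
-- outside the precondition, e.g. on find(-2, 1): A returns 1, B returns 1; on find(-6, 3): A returns 5, B returns 5
import Mathlib
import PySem

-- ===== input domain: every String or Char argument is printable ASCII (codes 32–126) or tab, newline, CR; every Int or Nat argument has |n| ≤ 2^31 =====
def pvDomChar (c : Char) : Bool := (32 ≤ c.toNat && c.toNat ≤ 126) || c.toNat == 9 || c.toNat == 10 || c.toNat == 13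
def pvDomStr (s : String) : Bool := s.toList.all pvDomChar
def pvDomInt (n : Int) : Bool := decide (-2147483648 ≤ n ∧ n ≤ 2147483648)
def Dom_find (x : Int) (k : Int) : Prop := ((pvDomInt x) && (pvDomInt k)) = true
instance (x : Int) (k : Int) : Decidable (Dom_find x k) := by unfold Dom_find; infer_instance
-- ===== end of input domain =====

-- B replaces A's nested loops (persistent one-hot mask skipping set bits) by a recursion that
-- finds the lowest zero bit of x in O(1) via ((x ^ (x+1)) + 1) >> 1, deposits the low bit of k
-- there, and recurses on x with that bit set; alternative decomposition, same linear cost.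

-- ===== PORT A =====
-- inner 'while one & x: one <<= 1' (fuel-guarded; under Pre_ the fuel is never exhausted)
def skipA (x : Int) : Nat → Int → Option Int
  | 0, one => if PySem.Int.band one x = 0 then some one else none
  | n+1, one => if PySem.Int.band one x = 0 then some one else skipA x n (one <<< (1:Nat))

-- outer 'while k:' (fuel-guarded)
def loopA (x : Int) : Nat → Int → Int → Int → Option Int
  | 0, result, _, k => if k = 0 then some result else none
  | n+1, result, one, k =>
    if k = 0 then some result
    else match skipA x (n+1) one with
      | none => none
      | some one' => loopA x n (result + one' * PySem.Int.band k 1) (one' <<< (1:Nat)) (k >>> (1:Nat))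

def find (x : Int) (k : Int) : Int := (loopA x 200 0 1 k).getD 0

-- ===== PORT B =====
-- recursion of Source B, fuel-guarded: base k == 0, else deposit at lowest zero bit z of x
def loopB : Nat → Int → Int → Option Int
  | 0, _, k => if k = 0 then some 0 else none
  | n+1, x, k =>
    if k = 0 then some 0
    else
      let z := (PySem.Int.bxor x (x + 1) + 1) >>> (1:Nat)
      match loopB n (PySem.Int.bor x z) (k >>> (1:Nat)) with
      | none => none
      | some r => some ((if PySem.Int.band k 1 ≠ 0 then z else 0) + r)

def find_alt (x : Int) (k : Int) : Int := (loopB 200 x k).getD 0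

-- ===== PRECONDITION & SPEC =====
-- Pre_ excludes k < 0 (A always infinite-loops) and x < 0 with k ≠ 0, where A infinite-loops
-- whenever k needs more bits than x has zero bits (on the remaining negative-x inputs A and B
-- agree, but the claim is not extended there).
def Pre_find (x : Int) (k : Int) : Prop := 0 ≤ k ∧ (0 ≤ x ∨ k = 0)
instance (x : Int) (k : Int) : Decidable (Pre_find x k) := by unfold Pre_find; infer_instance
def pvWitness_find : Int × Int := (5, 3)
def Spec_find (x : Int) (k : Int) (out : Int) : Prop := out = find_alt x k
instance (x : Int) (k : Int) (out : Int) : Decidable (Spec_find x k out) := by unfold Spec_find; infer_instance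

-- ===== CLAIM (what is proved, stated in full; the proofs are below) =====
def Claim_equal_find : Prop := ∀ (x : Int) (k : Int), Dom_find x k → Pre_find x k → Spec_find x k (find x k)

-- ===== LEMMAS AND PROOFS =====

-- bit length, proof-side measure
def sz : Nat → Nat
  | 0 => 0
  | n+1 => sz ((n+1)/2) + 1
decreasing_by exact Nat.div_lt_self (Nat.succ_pos n) (by norm_num)

lemma sz_succ (n : Nat) (h : n ≠ 0) : sz n = sz (n / 2) + 1 := by
  cases n with
  | zero => exact absurd rfl h
  | succ m => rw [sz]

lemma sz_le (m : Nat) : ∀ n : Nat, n < 2^m → sz n ≤ m := by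
  induction m with
  | zero => intro n h; interval_cases n; simp [sz]
  | succ m ih =>
    intro n h
    rcases Nat.eq_zero_or_pos n with h0 | hp
    · subst h0; simp [sz]
    · rw [sz_succ n (by omega)]
      have : n / 2 < 2^m := by
        have : 2^(m+1) = 2 * 2^m := by ring
        omega
      exact Nat.succ_le_succ (ih _ this)

lemma band_pow_eq_zero_iff (xn p : Nat) :
    PySem.Int.band ((2:Int)^p) (xn : Int) = 0 ↔ xn.testBit p = false := by
  rw [show ((2:Int)^p) = (((2^p : Nat)) : Int) by push_cast; ring]
  rw [PySem.Int.band_natCast]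
  norm_cast
  rw [Nat.two_pow_and]
  cases h : xn.testBit p <;> simp

lemma pow_cast_shift (q : Nat) : ((2:Int)^q) <<< (1:Nat) = (2:Int)^(q+1) := by
  rw [Int.shiftLeft_eq]
  ring

lemma testBit_false_of_ge (xn : Nat) (hx : xn < 2^32) (p : Nat) (hp : 32 ≤ p) :
    xn.testBit p = false := by
  apply Nat.testBit_eq_false_of_lt
  calc xn < 2^32 := hx
    _ ≤ 2^p := Nat.pow_le_pow_right (by norm_num) hp

lemma skip_some (xn : Nat) (hx : xn < 2^32) :
    ∀ n p : Nat, 32 ≤ n + p →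
    ∃ q, p ≤ q ∧ q ≤ max p 32 ∧ xn.testBit q = false ∧
      (∀ i, p ≤ i → i < q → xn.testBit i = true) ∧
      skipA (xn : Int) n ((2:Int)^p) = some ((2:Int)^q) := by
  intro n
  induction n with
  | zero =>
    intro p hp
    have hb : xn.testBit p = false := testBit_false_of_ge xn hx p (by omega)
    refine ⟨p, le_refl p, le_max_left _ _, hb, by omega, ?_⟩
    simp only [skipA, if_pos ((band_pow_eq_zero_iff xn p).mpr hb)]
  | succ n ih =>
    intro p hp
    cases hb : xn.testBit p with
    | false =>
      refine ⟨p, le_refl p, le_max_left _ _, hb, by omega, ?_⟩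
      simp only [skipA, if_pos ((band_pow_eq_zero_iff xn p).mpr hb)]
    | true =>
      have hplt : p < 32 := by
        by_contra h
        rw [testBit_false_of_ge xn hx p (by omega)] at hb; exact absurd hb (by simp)
      obtain ⟨q, hpq, hqm, hbq, hall, hskip⟩ := ih (p+1) (by omega)
      refine ⟨q, by omega, by omega, hbq, ?_, ?_⟩
      · intro i h1 h2
        rcases Nat.eq_or_lt_of_le h1 with h | h
        · subst h; exact hb
        · exact hall i (by omega) h2
      · have hne : ¬ PySem.Int.band ((2:Int)^p) (xn : Int) = 0 := by
          rw [band_pow_eq_zero_iff xn p, hb]; simp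
        simp only [skipA, if_neg hne]
        rw [pow_cast_shift p]
        exact hskip

lemma loopA_zero (x : Int) (n : Nat) (r one : Int) : loopA x n r one 0 = some r := by
  cases n <;> simp [loopA]

lemma loopB_zero (n : Nat) (x : Int) : loopB n x 0 = some 0 := by
  cases n <;> simp [loopB]

lemma band_one_cast (kn : Nat) : PySem.Int.band (kn : Int) 1 = ((kn % 2 : Nat) : Int) := by
  rw [show (1 : Int) = ((1 : Nat) : Int) from rfl, PySem.Int.band_natCast, Nat.and_one_is_mod]

lemma shiftR_one_cast (kn : Nat) : (kn : Int) >>> (1 : Nat) = ((kn / 2 : Nat) : Int) := by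
  have : ((kn : Int) >>> (1 : Nat)) = ((kn >>> 1 : Nat) : Int) := by
    exact_mod_cast Int.natCast_shiftRight kn 1
  rw [this, Nat.shiftRight_one]

-- bits of xn ||| (2^p - 1)
lemma testBit_or_mask (xn p i : Nat) :
    (xn ||| (2^p - 1)).testBit i = (xn.testBit i || decide (i < p)) := by
  rw [Nat.testBit_or, Nat.testBit_two_pow_sub_one]

-- m with all bits < q set and bit q clear: m % 2^(q+1) = 2^q - 1
lemma mod_form (m q : Nat) (h0 : ∀ i, i < q → m.testBit i = true) (h1 : m.testBit q = false) :
    m % 2^(q+1) = 2^q - 1 := by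
  apply Nat.eq_of_testBit_eq
  intro i
  rw [Nat.testBit_mod_two_pow, Nat.testBit_two_pow_sub_one]
  rcases lt_trichotomy i q with h | h | h
  · have h' : i < q + 1 := by omega
    simp [h, h0 i h, h']
  · subst h; simp [h1]
  · have h1' : ¬ i < q + 1 := by omega
    have h2' : ¬ i < q := by omega
    simp [h1', h2']

-- the carry identity: m ^^^ (m+1) = 2^(q+1) - 1 where q is the lowest zero bit of m
lemma xor_succ_eq (m q : Nat) (h0 : ∀ i, i < q → m.testBit i = true) (h1 : m.testBit q = false) :
    m ^^^ (m + 1) = 2^(q+1) - 1 := by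
  have hmod : m % 2^(q+1) = 2^q - 1 := mod_form m q h0 h1
  have hdm := Nat.div_add_mod m (2^(q+1))
  set c := m / 2^(q+1) with hc
  have hm : m = 2^(q+1) * c + (2^q - 1) := by omega
  have hm1 : m + 1 = 2^(q+1) * c + 2^q := by
    have : 0 < 2^q := Nat.two_pow_pos q
    omega
  have hlt1 : 2^q - 1 < 2^(q+1) := by
    have h1 : 0 < 2^q := Nat.two_pow_pos q
    have h2 : 2^(q+1) = 2*2^q := by ring
    omega
  have hlt2 : 2^q < 2^(q+1) := by
    have h1 : 0 < 2^q := Nat.two_pow_pos q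
    have h2 : 2^(q+1) = 2*2^q := by ring
    omega
  apply Nat.eq_of_testBit_eq
  intro i
  rw [Nat.testBit_xor, Nat.testBit_two_pow_sub_one]
  rw [hm1, hm]
  rw [Nat.testBit_two_pow_mul_add c hlt1 i, Nat.testBit_two_pow_mul_add c hlt2 i]
  by_cases hi : i < q + 1
  · rw [if_pos hi, if_pos hi, Nat.testBit_two_pow_sub_one, Nat.testBit_two_pow]
    rcases lt_trichotomy i q with h | h | h
    · have hne : q ≠ i := by omega
      simp [h, hi, hne]
    · subst h; simp
    · omega
  · rw [if_neg hi, if_neg hi]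
    simp [hi]

-- marking bit q used: (xn ||| (2^p-1)) ||| 2^q = xn ||| (2^(q+1)-1)
lemma or_step (xn p q : Nat) (hpq : p ≤ q) (hall : ∀ i, p ≤ i → i < q → xn.testBit i = true) :
    (xn ||| (2^p - 1)) ||| 2^q = xn ||| (2^(q+1) - 1) := by
  apply Nat.eq_of_testBit_eq
  intro i
  rw [Nat.testBit_or, testBit_or_mask, Nat.testBit_or, Nat.testBit_two_pow_sub_one,
      Nat.testBit_two_pow]
  rcases lt_trichotomy i q with h | h | h
  · have hq1 : i < q + 1 := by omega
    by_cases hp : i < p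
    · simp [hp, hq1]
    · simp [hall i (by omega) h, hq1]
  · subst h
    simp
  · have hp' : ¬ i < p := by omega
    have hne : q ≠ i := by omega
    have hq1 : ¬ i < q + 1 := by omega
    simp [hp', hne, hq1]

lemma loop_eq (xn : Nat) (hx : xn < 2^32) : ∀ kn : Nat, kn < 2^32 →
    ∀ (p : Nat) (r : Int) (nA nB : Nat), sz kn + 32 ≤ nA → sz kn ≤ nB →
    ∃ v : Int, loopA (xn : Int) nA r ((2:Int)^p) (kn : Int) = some (r + v) ∧
      loopB nB (((xn ||| (2^p - 1) : Nat)) : Int) (kn : Int) = some v := by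
  intro kn
  induction kn using Nat.strong_induction_on with
  | _ kn IH =>
    intro hk p r nA nB hA hB
    rcases Nat.eq_zero_or_pos kn with h0 | hpos
    · subst h0
      refine ⟨0, ?_, ?_⟩
      · simp only [Nat.cast_zero]; rw [loopA_zero, add_zero]
      · simp only [Nat.cast_zero]; rw [loopB_zero]
    · have hkne : (kn : Int) ≠ 0 := Int.natCast_ne_zero.mpr (by omega)
      have hsz1 : 1 ≤ sz kn := by rw [sz_succ kn (by omega)]; omega
      obtain ⟨m, rfl⟩ : ∃ m, nA = m + 1 := ⟨nA - 1, by omega⟩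
      obtain ⟨q, hpq, hqm, hbq, hall, hskip⟩ := skip_some xn hx (m+1) p (by omega)
      obtain ⟨g, rfl⟩ : ∃ g, nB = g + 1 := ⟨nB - 1, by omega⟩
      set M : Nat := xn ||| (2^p - 1) with hM
      -- facts about M's bits
      have hMlow : ∀ i, i < q → M.testBit i = true := by
        intro i hi
        rw [hM, testBit_or_mask]
        by_cases hp : i < p
        · simp [hp]
        · simp [hall i (by omega) hi]
      have hMq : M.testBit q = false := by
        rw [hM, testBit_or_mask, hbq]
        simp [show ¬ q < p by omega]
      have hszh : sz kn = sz (kn / 2) + 1 := sz_succ kn (by omega)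
      obtain ⟨v', hA', hB'⟩ := IH (kn / 2) (Nat.div_lt_self hpos (by norm_num)) (by omega)
        (q+1) (r + (2:Int)^q * ((kn % 2 : Nat) : Int)) m g (by omega) (by omega)
      -- A's one outer iteration
      have hAstep : loopA (xn : Int) (m+1) r ((2:Int)^p) (kn : Int)
          = loopA (xn : Int) m (r + (2:Int)^q * ((kn % 2 : Nat) : Int)) ((2:Int)^(q+1)) ((kn / 2 : Nat) : Int) := by
        simp only [loopA, if_neg hkne]
        rw [hskip]
        simp only []
        rw [band_one_cast, pow_cast_shift, shiftR_one_cast]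
      -- B's z is 2^q
      have hz : (PySem.Int.bxor (M : Int) ((M : Int) + 1) + 1) >>> (1:Nat) = (((2^q : Nat)) : Int) := by
        rw [show ((M : Int) + 1) = (((M + 1 : Nat)) : Int) by push_cast; ring,
            PySem.Int.bxor_natCast, xor_succ_eq M q hMlow hMq,
            show ((((2^(q+1) - 1 : Nat)) : Int) + 1) = (((2^(q+1) : Nat)) : Int) by
              have h1 : (2^(q+1) - 1) + 1 = 2^(q+1) := Nat.succ_pred_eq_of_pos (Nat.two_pow_pos _)
              rw [← h1]; exact (Nat.cast_add_one _).symm,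
            shiftR_one_cast]
        congr 1
        rw [Nat.pow_succ, Nat.mul_div_cancel _ (by norm_num)]
      -- B's recursive argument
      have hbor : PySem.Int.bor (M : Int) (((2^q : Nat)) : Int) = (((xn ||| (2^(q+1) - 1) : Nat)) : Int) := by
        rw [PySem.Int.bor_natCast, hM, or_step xn p q hpq hall]
      have hdep : (if PySem.Int.band (kn : Int) 1 ≠ 0 then (((2^q : Nat)) : Int) else 0)
          = (2:Int)^q * ((kn % 2 : Nat) : Int) := by
        rw [band_one_cast]
        rcases Nat.mod_two_eq_zero_or_one kn with h | h <;> simp [h]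
      refine ⟨(2:Int)^q * ((kn % 2 : Nat) : Int) + v', ?_, ?_⟩
      · rw [hAstep, hA', add_assoc]
      · simp only [loopB, if_neg hkne]
        rw [hz, hbor, shiftR_one_cast, hB', hdep]

-- ===== VERDICT (by name: the statement is the Claim_ definition above) =====
theorem find_spec : Claim_equal_find := by
  intro x k hdom hpre
  unfold Spec_find find find_alt
  obtain ⟨hk0, hx0⟩ := hpre
  rcases eq_or_ne k 0 with rfl | hkne
  · rw [loopA_zero, loopB_zero]
  · have hx : 0 ≤ x := hx0.resolve_right hkne
    simp only [Dom_find, pvDomInt, Bool.and_eq_true, decide_eq_true_eq] at hdom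
    obtain ⟨⟨_, hxu⟩, ⟨_, hku⟩⟩ := hdom
    have hxe : x = ((x.toNat : Nat) : Int) := (Int.toNat_of_nonneg hx).symm
    have hke : k = ((k.toNat : Nat) : Int) := (Int.toNat_of_nonneg hk0).symm
    have hxlt : x.toNat < 2^32 := by omega
    have hklt : k.toNat < 2^32 := by omega
    have hszk : sz k.toNat ≤ 32 := sz_le 32 k.toNat hklt
    obtain ⟨v, hA, hB⟩ := loop_eq x.toNat hxlt k.toNat hklt 0 0 200 200 (by omega) (by omega)
    rw [hxe, hke]
    rw [pow_zero] at hA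
    have hM0 : x.toNat ||| (2^0 - 1) = x.toNat := by simp
    rw [hM0] at hB
    rw [hA, hB, zero_add]
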